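-- pv_equiv track=rewrite | github.com/rhtm02/socket | server.py | ParsingMsg
-- ===== SOURCE A (Python) =====
-- def ParsingMsg(msg):
--     lst = msg.split(' ')
--     output = str()
--     temp = str()
--     for i in lst:
--         temp += i
--     lst = temp.split('\'')
--     for i in lst[1:]:
--         output += i
--     return output
-- ===== SOURCE B (Python) =====
-- def ParsingMsg(msg):
--     seen = False
--     out = []
--     for c in msg:
--         if c == ' ':
--             continue
--         if c == "'":
--             seen = True
--             continue
--         if seen:
--             out.append(c)
--     return ''.join(out)
-- ===== Notes on version B (the rewrite author's own statement) =====
-- stated objective: simpler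
-- what changed: Replaces the split/concat/split/concat pipeline with a single pass over the characters keeping a boolean flag (first quote seen) and an accumulator.
import Mathlib
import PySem

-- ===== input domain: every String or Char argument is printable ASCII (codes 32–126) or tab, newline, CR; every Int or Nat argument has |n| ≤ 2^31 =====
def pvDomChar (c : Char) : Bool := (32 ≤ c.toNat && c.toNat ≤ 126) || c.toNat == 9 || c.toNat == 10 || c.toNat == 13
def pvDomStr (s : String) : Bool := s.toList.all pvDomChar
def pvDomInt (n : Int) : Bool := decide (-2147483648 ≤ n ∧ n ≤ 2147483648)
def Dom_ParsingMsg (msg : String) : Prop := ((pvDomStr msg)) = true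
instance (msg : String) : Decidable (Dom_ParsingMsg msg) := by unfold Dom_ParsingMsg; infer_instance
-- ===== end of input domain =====

-- B replaces A's split/concat/split/concat pipeline by a single character scan with a
-- boolean flag recording whether the first quote has been seen (objective: simpler).

-- ===== PORT A =====
def ParsingMsg (msg : String) : String :=
  let lst := PySem.Chars.splitOn msg.toList [' ']
  let temp := lst.foldl (fun acc i => acc ++ i) []
  let lst2 := PySem.Chars.splitOn temp ['\'']
  let output := (PySem.List.slice lst2 (some 1) none).foldl (fun acc i => acc ++ i) []
  String.ofList output

-- ===== PORT B =====
def pvAltStep (st : Bool × List Char) (c : Char) : Bool × List Char :=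
  if c == ' ' then st
  else if c == '\'' then (true, st.2)
  else if st.1 then (st.1, st.2 ++ [c]) else st

def ParsingMsg_alt (msg : String) : String :=
  String.ofList (msg.toList.foldl pvAltStep (false, [])).2

-- ===== PRECONDITION & SPEC =====
def Spec_ParsingMsg (msg : String) (out : String) : Prop := out = ParsingMsg_alt msg
instance (msg : String) (out : String) : Decidable (Spec_ParsingMsg msg out) := by unfold Spec_ParsingMsg; infer_instance

-- ===== CLAIM (what is proved, stated in full; the proofs are below) =====
def Claim_equal_ParsingMsg : Prop := ∀ (msg : String), Dom_ParsingMsg msg → Spec_ParsingMsg msg (ParsingMsg msg)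

-- ===== LEMMAS AND PROOFS =====

-- structural form of splitOn with a single-character separator
def pvSp (q : Char) : List Char → List (List Char)
  | [] => [[]]
  | c :: rest => if c == q then [] :: pvSp q rest else (pvSp q rest).modifyHead (c :: ·)

theorem pvSp_ne_nil (q : Char) (cs : List Char) : pvSp q cs ≠ [] := by
  cases cs with
  | nil => simp [pvSp]
  | cons c rest =>
      simp only [pvSp]; split
      · simp
      · cases h : pvSp q rest with
        | nil => exact absurd h (pvSp_ne_nil q rest)
        | cons a t => simp [List.modifyHead]

theorem pvGo_eq (q : Char) (fuel : Nat) (l cur : List Char) (acc : List (List Char))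
    (h : l.length < fuel) :
    PySem.Chars.splitOn.go [q] fuel l cur acc
      = acc.reverse ++ (pvSp q l).modifyHead (cur.reverse ++ ·) := by
  induction fuel generalizing l cur acc with
  | zero => omega
  | succ n ih =>
    cases l with
    | nil => simp [PySem.Chars.splitOn.go, pvSp, List.modifyHead]
    | cons c rest =>
      rw [PySem.Chars.splitOn.go]
      by_cases hc : c == q
      · have hp : List.isPrefixOf [q] (c :: rest) = true := by
          simp [List.isPrefixOf]; exact (beq_iff_eq.mp hc).symm ▸ rfl
        simp only [hp, if_pos, List.length_cons] at *
        rw [ih _ _ _ (by simpa using h)]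
        simp only [pvSp, hc, if_pos, List.modifyHead, List.reverse_cons,
          List.append_assoc, List.nil_append, List.cons_append]
        cases hsp : pvSp q rest <;> simp [hsp]
      · have hp : List.isPrefixOf [q] (c :: rest) = false := by
          cases hq : List.isPrefixOf [q] (c :: rest)
          · rfl
          · exfalso; simp [List.isPrefixOf] at hq
            exact absurd (beq_iff_eq.mpr hq.symm) hc
        simp only [hp, Bool.false_eq_true, if_false]
        rw [ih _ _ _ (by simpa using h)]
        simp only [pvSp, hc, Bool.false_eq_true, if_false, List.reverse_cons]
        obtain ⟨a, t, hsp⟩ := List.exists_cons_of_ne_nil (pvSp_ne_nil q rest)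
        simp [hsp, List.modifyHead]

theorem pvSplitOn_single (q : Char) (cs : List Char) :
    PySem.Chars.splitOn cs [q] = pvSp q cs := by
  rw [PySem.Chars.splitOn, pvGo_eq q (cs.length + 1) cs [] [] (by omega)]
  obtain ⟨a, t, hsp⟩ := List.exists_cons_of_ne_nil (pvSp_ne_nil q cs)
  simp [hsp, List.modifyHead]

theorem pvFlatten_sp (q : Char) (cs : List Char) :
    (pvSp q cs).flatten = cs.filter (fun c => !(c == q)) := by
  induction cs with
  | nil => simp [pvSp]
  | cons c rest ih =>
    by_cases hc : c == q
    · simp [pvSp, hc, List.filter, ih]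
    · obtain ⟨a, t, hsp⟩ := List.exists_cons_of_ne_nil (pvSp_ne_nil q rest)
      simp only [pvSp, hc, Bool.false_eq_true, if_false, hsp, List.modifyHead,
        List.flatten_cons, List.cons_append, List.filter_cons]
      simp only [Bool.not_false, if_pos]
      rw [← List.flatten_cons, ← hsp, ih]

theorem pvFlatten_tail_sp (q : Char) (cs : List Char) :
    ((pvSp q cs).tail).flatten
      = ((cs.dropWhile (fun c => !(c == q))).tail).filter (fun c => !(c == q)) := by
  induction cs with
  | nil => simp [pvSp]
  | cons c rest ih =>
    by_cases hc : c == q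
    · simp [pvSp, hc, List.dropWhile, pvFlatten_sp]
    · obtain ⟨a, t, hsp⟩ := List.exists_cons_of_ne_nil (pvSp_ne_nil q rest)
      simp only [pvSp, hc, Bool.false_eq_true, if_false, hsp, List.modifyHead,
        List.dropWhile, Bool.not_false, List.tail_cons] at *
      exact ih

theorem pvFoldl_true (cs : List Char) (acc : List Char) :
    cs.foldl pvAltStep (true, acc)
      = (true, acc ++ cs.filter (fun c => !(c == ' ') && !(c == '\''))) := by
  induction cs generalizing acc with
  | nil => simp
  | cons c rest ih =>
    by_cases h1 : c == ' '
    · simp [pvAltStep, h1, ih]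
    · by_cases h2 : c == '\''
      · simp [pvAltStep, h1, h2, ih]
      · simp [pvAltStep, h1, h2, ih]

theorem pvFoldl_false (cs : List Char) (acc : List Char) :
    (cs.foldl pvAltStep (false, acc)).2
      = acc ++ ((cs.dropWhile (fun c => !(c == '\''))).tail).filter
          (fun c => !(c == ' ') && !(c == '\'')) := by
  induction cs with
  | nil => simp
  | cons c rest ih =>
    by_cases h2 : c == '\''
    · have h1 : ¬ c == ' ' := by simp_all only [beq_iff_eq]; subst h2; decide
      simp [pvAltStep, h1, h2, List.dropWhile, pvFoldl_true]
    · by_cases h1 : c == ' '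
      · simp [pvAltStep, h1, List.dropWhile, h2, ih]
      · simp [pvAltStep, h1, h2, List.dropWhile, ih]

theorem pvDropWhile_filter (cs : List Char) :
    (cs.filter (fun c => !(c == ' '))).dropWhile (fun c => !(c == '\''))
      = (cs.dropWhile (fun c => !(c == '\''))).filter (fun c => !(c == ' ')) := by
  induction cs with
  | nil => simp
  | cons c rest ih =>
    by_cases h1 : c == ' '
    · have h2 : ¬ c == '\'' := by
        simp_all only [beq_iff_eq]; subst h1; decide
      simp [List.filter, List.dropWhile, h1, h2, ih]
    · by_cases h2 : c == '\''
      · simp [List.filter, List.dropWhile, h1, h2]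
      · simp [List.filter, List.dropWhile, h1, h2, ih]

theorem pvTail_filter (cs : List Char) :
    (((cs.dropWhile (fun c => !(c == '\''))).filter (fun c => !(c == ' ')))).tail
      = ((cs.dropWhile (fun c => !(c == '\''))).tail).filter (fun c => !(c == ' ')) := by
  cases hd : cs.dropWhile (fun c => !(c == '\'')) with
  | nil => simp
  | cons a t =>
    have ha : ¬ (fun c => !(c == '\'')) a = true := by
      have := List.head_dropWhile_not (p := fun c => !(c == '\'')) (l := cs)
        (by simp [hd])
      simpa [hd] using this
    have ha' : a == '\'' := by simpa using ha
    have : ¬ a == ' ' := by simp_all only [beq_iff_eq]; subst ha'; decide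
    simp [List.filter, this]

-- ===== VERDICT (by name: the statement is the Claim_ definition above) =====
theorem ParsingMsg_spec : Claim_equal_ParsingMsg := by
  intro msg _
  unfold Spec_ParsingMsg ParsingMsg ParsingMsg_alt
  simp only [pvSplitOn_single, PySem.List.slice_from_one,
    PySem.List.foldl_append_eq_flatMap (fun i => i), List.flatMap_id', List.nil_append]
  rw [pvFlatten_sp, pvFlatten_tail_sp, pvFoldl_false,
    pvDropWhile_filter, pvTail_filter, List.filter_filter]
  simp only [List.nil_append]
  congr 1
  exact List.filter_congr (fun a _ => by rw [Bool.and_comm])
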